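-- pv_equiv track=rewrite | github.com/programiranje3fon/labs2018 | lab1.py | list_stats
-- ===== SOURCE A (Python) =====
-- def list_stats(a_list):
--     smallest = abs(a_list[0])
--     largest = abs(a_list[0])
--     sum_pos = 0
--     prod_neg = 1
--     for num in a_list:
--         if abs(num) < smallest: smallest = abs(num)
--         elif abs(num) > largest: largest = abs(num)
--         if num > 0: sum_pos += num
--         elif num < 0: prod_neg *= num
--     return smallest, largest, sum_pos, prod_neg
-- ===== SOURCE B (Python) =====
-- def list_stats(a_list):
--     abss = [abs(x) for x in a_list]
--     prod_neg = 1
--     for x in a_list: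
--         if x < 0:
--             prod_neg *= x
--     return min(abss), max(abss), sum(x for x in a_list if x > 0), prod_neg
-- ===== Notes on version B (the rewrite author's own statement) =====
-- stated objective: idiomatic
-- what changed: A's single fused four-statistic loop with coupled if/elif state is replaced by independent standard reductions: min/max over a mapped abs list, a filtered sum, and a separate negative-product loop.
-- outside the precondition, e.g. on list_stats([]): A raises IndexError, B raises ValueError
import Mathlib
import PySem

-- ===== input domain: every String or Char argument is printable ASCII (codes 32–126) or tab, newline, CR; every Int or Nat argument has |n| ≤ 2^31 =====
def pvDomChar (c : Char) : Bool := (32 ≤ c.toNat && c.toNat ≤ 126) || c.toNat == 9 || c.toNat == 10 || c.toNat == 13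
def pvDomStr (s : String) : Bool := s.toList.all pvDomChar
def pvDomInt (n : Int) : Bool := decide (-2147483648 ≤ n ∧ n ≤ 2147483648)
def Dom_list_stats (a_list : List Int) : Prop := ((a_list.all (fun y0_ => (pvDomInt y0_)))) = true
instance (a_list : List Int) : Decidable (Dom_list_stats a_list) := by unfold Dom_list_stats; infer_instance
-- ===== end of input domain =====

-- B replaces A's single fused four-statistic loop by independent standard reductions
-- (min/max over the mapped |x| list, a filtered sum, a separate negative-product loop); objective: idiomatic.


-- ===== PORT A =====
def list_stats (a_list : List Int) : Int × Int × Int × Int :=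
  match PySem.List.pyGet? a_list 0 with
  | none => (0, 0, 0, 0)  -- IndexError on the empty list; excluded by Pre_
  | some a0 =>
    a_list.foldl (fun st num =>
      let p1 := if |num| < st.1 then (|num|, st.2.1)
                else if |num| > st.2.1 then (st.1, |num|) else (st.1, st.2.1)
      let p2 := if num > 0 then (st.2.2.1 + num, st.2.2.2)
                else if num < 0 then (st.2.2.1, st.2.2.2 * num) else (st.2.2.1, st.2.2.2)
      (p1.1, p1.2, p2.1, p2.2)) (|a0|, |a0|, 0, 1)

-- ===== PORT B =====
def list_stats_alt (a_list : List Int) : Int × Int × Int × Int :=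
  let abss := a_list.map (fun x => |x|)
  let prod_neg := a_list.foldl (fun p x => if x < 0 then p * x else p) 1
  ((PySem.List.min? abss (fun y => y)).getD 0,
   (PySem.List.max? abss (fun y => y)).getD 0,
   (a_list.filter (fun x => x > 0)).foldl (· + ·) 0,
   prod_neg)

-- ===== PRECONDITION & SPEC =====
-- Pre_ excludes exactly the empty list, on which Python A raises IndexError.
def Pre_list_stats (a_list : List Int) : Prop := a_list ≠ []
instance (a_list : List Int) : Decidable (Pre_list_stats a_list) := by unfold Pre_list_stats; infer_instance
def pvWitness_list_stats : List Int := [3, -2, 0, 5]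
def Spec_list_stats (a_list : List Int) (out : Int × Int × Int × Int) : Prop := out = list_stats_alt a_list
instance (a_list : List Int) (out : Int × Int × Int × Int) : Decidable (Spec_list_stats a_list out) := by unfold Spec_list_stats; infer_instance

-- ===== CLAIM (what is proved, stated in full; the proofs are below) =====
def Claim_equal_list_stats : Prop := ∀ (a_list : List Int), Dom_list_stats a_list → Pre_list_stats a_list → Spec_list_stats a_list (list_stats a_list)

-- ===== LEMMAS AND PROOFS =====

-- A's fused loop computes the four statistics componentwise, given smallest ≤ largest.
theorem foldA_split (l : List Int) (sm lg sp pn : Int) (h : sm ≤ lg) :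
    l.foldl (fun (st : Int × Int × Int × Int) num =>
      let p1 := if |num| < st.1 then (|num|, st.2.1)
                else if |num| > st.2.1 then (st.1, |num|) else (st.1, st.2.1)
      let p2 := if num > 0 then (st.2.2.1 + num, st.2.2.2)
                else if num < 0 then (st.2.2.1, st.2.2.2 * num) else (st.2.2.1, st.2.2.2)
      (p1.1, p1.2, p2.1, p2.2)) (sm, lg, sp, pn)
    = (l.foldl (fun a x => min a |x|) sm,
       l.foldl (fun a x => max a |x|) lg,
       l.foldl (fun a x => if x > 0 then a + x else a) sp,
       l.foldl (fun a x => if x < 0 then a * x else a) pn) := by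
  induction l generalizing sm lg sp pn with
  | nil => rfl
  | cons x t ih =>
    simp only [List.foldl_cons]
    have hstep :
        ((if |x| < sm then (|x|, lg) else if |x| > lg then (sm, |x|) else (sm, lg)).1,
         (if |x| < sm then (|x|, lg) else if |x| > lg then (sm, |x|) else (sm, lg)).2,
         (if x > 0 then (sp + x, pn) else if x < 0 then (sp, pn * x) else (sp, pn)).1,
         (if x > 0 then (sp + x, pn) else if x < 0 then (sp, pn * x) else (sp, pn)).2)
        = ((min sm |x|, max lg |x|, (if x > 0 then sp + x else sp),
            (if x < 0 then pn * x else pn)) : Int × Int × Int × Int) := by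
      simp only [Prod.mk.injEq]
      split_ifs <;> simp_all <;> omega
    rw [hstep]
    exact ih _ _ _ _ (by omega)

theorem filter_sum_fold (l : List Int) (s : Int) :
    (l.filter (fun x => x > 0)).foldl (· + ·) s
      = l.foldl (fun a x => if x > 0 then a + x else a) s := by
  induction l generalizing s with
  | nil => rfl
  | cons x t ih =>
    by_cases h : x > 0 <;> simp [h, ih]

-- ===== VERDICT (by name: the statement is the Claim_ definition above) =====
theorem list_stats_spec : Claim_equal_list_stats := by
  intro a_list _ hpre
  unfold Spec_list_stats
  match a_list with
  | [] => exact absurd rfl hpre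
  | a :: t =>
    simp only [list_stats, list_stats_alt, PySem.List.pyGet?_zero_cons]
    rw [foldA_split (a :: t) |a| |a| 0 1 le_rfl]
    simp only [List.map_cons, PySem.List.min?_id_cons, PySem.List.max?_id_cons,
      Option.getD_some, List.foldl_map, ← filter_sum_fold, List.foldl_cons,
      min_self, max_self]
    by_cases ha : a > 0 <;> simp [ha]
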